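-- pv_equiv track=rewrite | github.com/Aiixalex/MiniSearchEngine | wildcard_query.py | wildcard2pattern
-- ===== SOURCE A (Python) =====
-- def wildcard2pattern(wildcard) :
--     pattern = '^'
--     for i in range(wildcard.__len__()) :
--         if wildcard[i] == '*' :
--             pattern += '[a-z]*'
--         elif wildcard[i] == '?' :
--             pattern += '[a-z]'
--         else :
--             pattern += wildcard[i]
--
--     pattern += '$'
--     return pattern
-- ===== SOURCE B (Python) =====
-- def wildcard2pattern(wildcard):
--     return '^' + wildcard.replace('*', '[a-z]*').replace('?', '[a-z]') + '$'
-- ===== Notes on version B (the rewrite author's own statement) =====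
-- stated objective: idiomatic
-- what changed: Replaces the per-character classifying loop with two whole-string str.replace substitutions ('*'->'[a-z]*' first, then '?'->'[a-z]').
import Mathlib
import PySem

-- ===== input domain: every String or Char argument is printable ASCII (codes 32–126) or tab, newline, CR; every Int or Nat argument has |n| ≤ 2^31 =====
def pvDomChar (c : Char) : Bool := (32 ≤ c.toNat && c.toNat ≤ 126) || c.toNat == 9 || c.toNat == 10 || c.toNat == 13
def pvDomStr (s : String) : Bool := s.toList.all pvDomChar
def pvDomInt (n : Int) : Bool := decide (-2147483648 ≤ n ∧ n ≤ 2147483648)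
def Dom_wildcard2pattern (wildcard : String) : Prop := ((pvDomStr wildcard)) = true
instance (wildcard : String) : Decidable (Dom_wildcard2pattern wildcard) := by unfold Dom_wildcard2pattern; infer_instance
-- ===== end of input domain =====

-- B replaces A's per-character classifying loop with two whole-string replace substitutions; return values proved equal on all inputs.

-- ===== PORT A =====
-- index i ranges over range(len(wildcard)), so wildcard[i] is always in range; pyGetD's default is never used
def wildcard2pattern (wildcard : String) : String :=
  let pattern := "^"
  let pattern := (PySem.List.pyRange 0 (PySem.List.len wildcard.toList)).foldl
    (fun pattern i =>
      if PySem.List.pyGetD wildcard.toList i ' ' = '*' then pattern ++ "[a-z]*"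
      else if PySem.List.pyGetD wildcard.toList i ' ' = '?' then pattern ++ "[a-z]"
      else pattern ++ String.ofList [PySem.List.pyGetD wildcard.toList i ' ']) pattern
  pattern ++ "$"

-- ===== PORT B =====
def wildcard2pattern_alt (wildcard : String) : String :=
  "^" ++ PySem.Str.replace (PySem.Str.replace wildcard "*" "[a-z]*") "?" "[a-z]" ++ "$"

-- ===== PRECONDITION & SPEC =====
def Spec_wildcard2pattern (wildcard : String) (out : String) : Prop := out = wildcard2pattern_alt wildcard
instance (wildcard : String) (out : String) : Decidable (Spec_wildcard2pattern wildcard out) := by unfold Spec_wildcard2pattern; infer_instance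

-- ===== CLAIM (what is proved, stated in full; the proofs are below) =====
def Claim_equal_wildcard2pattern : Prop := ∀ (wildcard : String), Dom_wildcard2pattern wildcard → Spec_wildcard2pattern wildcard (wildcard2pattern wildcard)

-- ===== LEMMAS AND PROOFS =====

-- single-character replace is a flatMap over the characters
theorem replace_go_single (c : Char) (new : List Char) :
    ∀ (fuel : Nat) (l acc : List Char), l.length ≤ fuel →
      PySem.Chars.replace.go [c] new fuel l acc
        = acc.reverse ++ l.flatMap (fun x => if x = c then new else [x]) := by
  intro fuel
  induction fuel with
  | zero =>
    intro l acc h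
    have : l = [] := List.eq_nil_of_length_eq_zero (Nat.le_zero.mp h)
    subst this
    simp [PySem.Chars.replace.go]
  | succ n ih =>
    intro l acc h
    cases l with
    | nil => simp [PySem.Chars.replace.go]
    | cons x t =>
      simp only [PySem.Chars.replace.go]
      by_cases hx : x = c
      · subst hx
        have hp : List.isPrefixOf [x] (x :: t) = true := by
          simp [List.isPrefixOf]
        simp only [hp, if_pos, List.length_cons, List.length_nil, List.drop_succ_cons, List.drop_zero]
        rw [ih t (new.reverse ++ acc) (by simpa using Nat.le_of_succ_le_succ h)]
        simp
      · have hp : List.isPrefixOf [c] (x :: t) = false := by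
          simp [List.isPrefixOf]
          exact fun h' => absurd h'.symm hx
        simp only [hp]
        rw [ih t (x :: acc) (by simpa using Nat.le_of_succ_le_succ h)]
        simp [hx]

theorem replace_single (s : List Char) (c : Char) (new : List Char) :
    PySem.Chars.replace s [c] new = s.flatMap (fun x => if x = c then new else [x]) := by
  simp only [PySem.Chars.replace, List.isEmpty]
  rw [replace_go_single c new s.length s [] (le_refl _)]
  simp

-- the loop body of A, over toList
theorem foldl_pattern (l : List Char) :
    ∀ (p : String),
      (l.foldl (fun pattern c =>
          if c = '*' then pattern ++ "[a-z]*"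
          else if c = '?' then pattern ++ "[a-z]"
          else pattern ++ String.ofList [c]) p).toList
        = p.toList ++ l.flatMap (fun c =>
            if c = '*' then "[a-z]*".toList
            else if c = '?' then "[a-z]".toList
            else [c]) := by
  induction l with
  | nil => intro p; simp
  | cons x t ih =>
    intro p
    simp only [List.foldl_cons, List.flatMap_cons]
    by_cases h1 : x = '*'
    · simp [h1, ih]
    · by_cases h2 : x = '?'
      · simp [h2, ih]
      · simp [h1, h2, ih]

theorem flatMap_compose (s : List Char) :
    (s.flatMap (fun x => if x = '*' then "[a-z]*".toList else [x])).flatMap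
        (fun x => if x = '?' then "[a-z]".toList else [x])
      = s.flatMap (fun c =>
          if c = '*' then "[a-z]*".toList
          else if c = '?' then "[a-z]".toList
          else [c]) := by
  rw [List.flatMap_assoc]
  apply List.flatMap_congr
  intro c _
  by_cases h1 : c = '*'
  · subst h1; decide
  · by_cases h2 : c = '?'
    · subst h2; simp
    · simp [h1, h2]

-- A's index loop equals the foldl over the characters (beta-reduced instance of foldl_pyRange_pyGetD)
theorem index_loop_eq (w : String) :
    (PySem.List.pyRange 0 (PySem.List.len w.toList)).foldl
      (fun pattern i =>
        if PySem.List.pyGetD w.toList i ' ' = '*' then pattern ++ "[a-z]*"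
        else if PySem.List.pyGetD w.toList i ' ' = '?' then pattern ++ "[a-z]"
        else pattern ++ String.ofList [PySem.List.pyGetD w.toList i ' ']) "^"
    = w.toList.foldl
      (fun pattern c =>
        if c = '*' then pattern ++ "[a-z]*"
        else if c = '?' then pattern ++ "[a-z]"
        else pattern ++ String.ofList [c]) "^" := by
  have h := PySem.List.foldl_pyRange_pyGetD w.toList ' '
    (fun p c => if c = '*' then p ++ "[a-z]*" else if c = '?' then p ++ "[a-z]"
      else p ++ String.ofList [c]) "^" (le_refl 0)
  simpa using h

-- ===== VERDICT (by name: the statement is the Claim_ definition above) =====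
theorem wildcard2pattern_spec : Claim_equal_wildcard2pattern := by
  intro w _
  unfold Spec_wildcard2pattern wildcard2pattern wildcard2pattern_alt
  apply String.toList_inj.mp
  show ((PySem.List.pyRange 0 (PySem.List.len w.toList)).foldl
      (fun pattern i =>
        if PySem.List.pyGetD w.toList i ' ' = '*' then pattern ++ "[a-z]*"
        else if PySem.List.pyGetD w.toList i ' ' = '?' then pattern ++ "[a-z]"
        else pattern ++ String.ofList [PySem.List.pyGetD w.toList i ' ']) "^" ++ "$").toList = _
  rw [index_loop_eq]
  simp only [String.toList_append, PySem.Str.toList_replace]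
  rw [foldl_pattern]
  have h1 : ("*" : String).toList = ['*'] := by decide
  have h2 : ("?" : String).toList = ['?'] := by decide
  rw [h1, h2, replace_single, replace_single, flatMap_compose]
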